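-- pv_equiv track=rewrite | github.com/trey-layton/beehiiv-automation | core/social_media/twitter/thread_utils.py | restructure_thread
-- ===== SOURCE A (Python) =====
-- from typing import List, Dict
--
-- def restructure_thread(
--     tweets: List[Dict[str, str]], web_url: str, subscribe_url: str
-- ) -> List[Dict[str, str]]:
--     # Ensure we have at least one tweet
--     if not tweets:
--         tweets = [{"text": "Check out our latest content!", "type": "content"}]
--
--     # Separate content tweets from special tweets
--     content_tweets = [tweet for tweet in tweets if tweet["type"] == "content"]
--
--     # Create or update the article link tweet
--     article_tweet = next(
--         (tweet for tweet in tweets if tweet["type"] == "article_link"), None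
--     )
--     if article_tweet is None:
--         article_tweet = {
--             "type": "article_link",
--             "text": f"Want to dive deeper? Read the full article here: {web_url}",
--         }
--     else:
--         article_tweet["text"] = (
--             f"Want to dive deeper? Read the full article here: {web_url}"
--         )
--
--     # Create or update the quote tweet
--     quote_tweet = next(
--         (tweet for tweet in tweets if tweet["type"] == "quote_tweet"), None
--     )
--     if quote_tweet is None:
--         quote_tweet = {
--             "type": "quote_tweet",
--             "text": f"If you found this thread valuable, please like and share! Subscribe for more content: {subscribe_url}",
--         }
--
--     # Combine all tweets in the correct order
--     return content_tweets + [article_tweet, quote_tweet]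
-- ===== SOURCE B (Python) =====
-- def restructure_thread(tweets, web_url, subscribe_url):
--     if not tweets:
--         tweets = [{"text": "Check out our latest content!", "type": "content"}]
--
--     # single pass: collect content tweets, capture first article/quote tweets
--     content, article, quote = [], None, None
--     for tweet in tweets:
--         t = tweet["type"]
--         if t == "content":
--             content.append(tweet)
--         elif t == "article_link" and article is None:
--             article = tweet
--         elif t == "quote_tweet" and quote is None:
--             quote = tweet
--
--     article_text = f"Want to dive deeper? Read the full article here: {web_url}"
--     if article is None:
--         article = {"type": "article_link", "text": article_text}
--     else:
--         article["text"] = article_text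
--     if quote is None:
--         quote = {
--             "type": "quote_tweet",
--             "text": f"If you found this thread valuable, please like and share! Subscribe for more content: {subscribe_url}",
--         }
--     return content + [article, quote]
-- ===== Notes on version B (the rewrite author's own statement) =====
-- stated objective: alternative
-- what changed: Replaces A's three separate scans (a filter comprehension plus two next() generator searches) with one explicit loop that simultaneously collects content tweets and captures the first article_link and quote_tweet.
import Mathlib
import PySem

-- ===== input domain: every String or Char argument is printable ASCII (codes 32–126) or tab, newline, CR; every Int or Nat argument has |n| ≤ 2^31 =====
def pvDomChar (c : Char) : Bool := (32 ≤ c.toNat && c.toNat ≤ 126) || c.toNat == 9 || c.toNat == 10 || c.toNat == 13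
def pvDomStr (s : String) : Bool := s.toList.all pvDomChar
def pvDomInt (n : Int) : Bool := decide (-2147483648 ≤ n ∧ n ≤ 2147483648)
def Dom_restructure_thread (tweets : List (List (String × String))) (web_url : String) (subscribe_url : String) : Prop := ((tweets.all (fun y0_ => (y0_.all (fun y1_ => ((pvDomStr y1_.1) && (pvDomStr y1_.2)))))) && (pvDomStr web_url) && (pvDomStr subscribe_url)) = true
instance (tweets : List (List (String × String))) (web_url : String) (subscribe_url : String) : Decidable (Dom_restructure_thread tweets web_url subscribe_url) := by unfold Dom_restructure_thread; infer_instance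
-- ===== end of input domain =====

-- B replaces A's three separate scans (filter + two next() searches) with one explicit loop;
-- note: Python A (and B) mutate a found article_link dict in place — the equivalence here is about the return value.


-- shared dict primitives (assoc list = Python dict): first-match lookup; assignment d[k]=v
-- (Python semantics: overwrite keeps the key's position, a new key is appended)
def dGet (d : List (String × String)) (k : String) : Option String :=
  match d with
  | [] => none
  | (k', v) :: rest => if k' == k then some v else dGet rest k

def dSet (d : List (String × String)) (k v : String) : List (String × String) :=
  match d with
  | [] => [(k, v)]
  | (k', v') :: rest => if k' == k then (k', v) :: rest else (k', v') :: dSet rest k v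

-- ===== PORT A =====
def restructure_thread (tweets : List (List (String × String))) (web_url : String) (subscribe_url : String) : List (List (String × String)) :=
  let tweets := if tweets = [] then [[("text", "Check out our latest content!"), ("type", "content")]] else tweets
  let content_tweets := tweets.filter (fun t => dGet t "type" == some "content")
  let article_text := "Want to dive deeper? Read the full article here: " ++ web_url
  let article_tweet :=
    match tweets.find? (fun t => dGet t "type" == some "article_link") with
    | none => [("type", "article_link"), ("text", article_text)]
    | some t => dSet t "text" article_text
  let quote_tweet :=
    match tweets.find? (fun t => dGet t "type" == some "quote_tweet") with
    | none => [("type", "quote_tweet"), ("text", "If you found this thread valuable, please like and share! Subscribe for more content: " ++ subscribe_url)]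
    | some t => t
  content_tweets ++ [article_tweet, quote_tweet]

-- ===== PORT B =====
-- the single for-loop of Source B: collect content tweets, capture first article/quote
def scanB (ts : List (List (String × String))) (content : List (List (String × String)))
    (article : Option (List (String × String))) (quote : Option (List (String × String))) :
    List (List (String × String)) × Option (List (String × String)) × Option (List (String × String)) :=
  match ts with
  | [] => (content, article, quote)
  | t :: rest =>
    let ty := dGet t "type"
    if ty == some "content" then scanB rest (content ++ [t]) article quote
    else if ty == some "article_link" && article.isNone then scanB rest content (some t) quote
    else if ty == some "quote_tweet" && quote.isNone then scanB rest content article (some t)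
    else scanB rest content article quote

def restructure_thread_alt (tweets : List (List (String × String))) (web_url : String) (subscribe_url : String) : List (List (String × String)) :=
  let tweets := if tweets.isEmpty then [[("text", "Check out our latest content!"), ("type", "content")]] else tweets
  let (content, article, quote) := scanB tweets [] none none
  let article_text := "Want to dive deeper? Read the full article here: " ++ web_url
  let article_tweet :=
    match article with
    | none => [("type", "article_link"), ("text", article_text)]
    | some t => dSet t "text" article_text
  let quote_tweet :=
    match quote with
    | none => [("type", "quote_tweet"), ("text", "If you found this thread valuable, please like and share! Subscribe for more content: " ++ subscribe_url)]
    | some t => t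
  content ++ [article_tweet, quote_tweet]

-- ===== PRECONDITION & SPEC =====
-- Pre_ excludes exactly the inputs where Python A raises KeyError: a tweet without a "type" key.
def Pre_restructure_thread (tweets : List (List (String × String))) (web_url : String) (subscribe_url : String) : Prop :=
  ∀ t ∈ tweets, "type" ∈ t.map Prod.fst
instance (tweets : List (List (String × String))) (web_url subscribe_url : String) : Decidable (Pre_restructure_thread tweets web_url subscribe_url) := by unfold Pre_restructure_thread; infer_instance

def pvWitness_restructure_thread : (List (List (String × String))) × String × String :=
  ([[("type", "content"), ("text", "hi")], [("type", "article_link"), ("text", "old")]], "https://w", "https://s")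

def Spec_restructure_thread (tweets : List (List (String × String))) (web_url : String) (subscribe_url : String) (out : List (List (String × String))) : Prop := out = restructure_thread_alt tweets web_url subscribe_url
instance (tweets : List (List (String × String))) (web_url : String) (subscribe_url : String) (out : List (List (String × String))) : Decidable (Spec_restructure_thread tweets web_url subscribe_url out) := by unfold Spec_restructure_thread; infer_instance

-- ===== CLAIM (what is proved, stated in full; the proofs are below) =====
def Claim_equal_restructure_thread : Prop := ∀ (tweets : List (List (String × String))) (web_url : String) (subscribe_url : String), Dom_restructure_thread tweets web_url subscribe_url → Pre_restructure_thread tweets web_url subscribe_url → Spec_restructure_thread tweets web_url subscribe_url (restructure_thread tweets web_url subscribe_url)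

-- ===== LEMMAS AND PROOFS =====

-- the single pass computes the filter and the two first-match searches at once
theorem scanB_eq (ts : List (List (String × String))) (content : List (List (String × String)))
    (article quote : Option (List (String × String))) :
    scanB ts content article quote =
      (content ++ ts.filter (fun t => dGet t "type" == some "content"),
       article.or (ts.find? (fun t => dGet t "type" == some "article_link")),
       quote.or (ts.find? (fun t => dGet t "type" == some "quote_tweet"))) := by
  induction ts generalizing content article quote with
  | nil => simp [scanB]
  | cons t rest ih =>
    simp only [scanB, List.filter_cons, List.find?_cons]
    by_cases h1 : dGet t "type" = some "content"
    · simp [h1, ih]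
    · by_cases h2 : dGet t "type" = some "article_link"
      · cases article with
        | none => simp [h2, ih]
        | some a => simp [h2, ih]
      · by_cases h3 : dGet t "type" = some "quote_tweet"
        · cases quote with
          | none => simp [h2, h3, ih]
          | some q => simp [h2, h3, ih]
        · have e2 : (dGet t "type" == some "article_link") = false := by simpa using h2
          have e3 : (dGet t "type" == some "quote_tweet") = false := by simpa using h3
          simp [h1, e2, e3, ih]

-- ===== VERDICT (by name: the statement is the Claim_ definition above) =====
theorem restructure_thread_spec : Claim_equal_restructure_thread := by
  intro tweets web_url subscribe_url _ _
  unfold Spec_restructure_thread restructure_thread restructure_thread_alt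
  simp only [List.isEmpty_iff, scanB_eq, Option.or, List.nil_append]
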